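-- pv_equiv track=rewrite | github.com/olsch88/DucksandDragons | quest11.py | move_left_v2
-- ===== SOURCE A (Python) =====
-- def move_left_v2(ducks: list[int], max_rounds=-1) -> int:
--     min_pos=0
--     max_pos=0
--     moved=True
--     rounds = 0
--     while moved:
--         moved = False
--         min_pos=ducks.index(min(ducks))
--         max_pos=ducks.index(max(ducks))
--         if ducks[min_pos]==ducks[max_pos]:# all sorted
--             break
--         ducks[min_pos]+=1
--         ducks[max_pos]-=1
--         moved=True
--         rounds +=1
--     return rounds
-- ===== SOURCE B (Python) =====
-- def move_left_v2(ducks: list[int], max_rounds=-1) -> int: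
--     # Closed form: each round moves one unit from the max to the min, so the
--     # round count equals the total surplus above the mean. (A also mutates
--     # `ducks` in place; B does not — the equivalence is about the return value.)
--     mean = sum(ducks) // len(ducks)
--     return sum(d - mean for d in ducks if d > mean)
-- ===== Notes on version B (the rewrite author's own statement) =====
-- stated objective: faster
-- what changed: Replaces the round-by-round simulation (each round re-scans the list for min/max and their indexes) by the closed form 'sum of surpluses above the integer mean'; intended as faster: in the timing runs A timed out at n=16 while B returned.
-- outside the precondition, e.g. on move_left_v2([], -1): A raises ValueError, B raises ZeroDivisionError
import Mathlib
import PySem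

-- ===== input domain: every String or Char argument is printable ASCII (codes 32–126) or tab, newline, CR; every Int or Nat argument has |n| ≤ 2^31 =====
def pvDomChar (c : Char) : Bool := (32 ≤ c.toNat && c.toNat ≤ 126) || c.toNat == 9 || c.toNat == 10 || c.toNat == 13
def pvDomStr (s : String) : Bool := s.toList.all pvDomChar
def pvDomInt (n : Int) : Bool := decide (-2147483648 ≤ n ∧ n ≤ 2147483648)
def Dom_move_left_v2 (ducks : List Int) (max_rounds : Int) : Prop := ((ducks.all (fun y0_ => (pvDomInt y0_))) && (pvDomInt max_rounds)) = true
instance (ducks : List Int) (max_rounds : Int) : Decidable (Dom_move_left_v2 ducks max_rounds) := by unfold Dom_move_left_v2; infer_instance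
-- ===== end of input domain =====

-- B replaces A's round-by-round simulation with the closed form "sum of surpluses
-- above the integer mean" (intended as faster; a timing run saw A time out at n=16 where B returned). A mutates `ducks` in place, B does not; the
-- equivalence proved here is about the return value only.

-- ===== PORT A =====
-- A's while loop, with a fuel counter that only makes the recursion total: on every
-- input admitted by Pre_ the fuel (2*Σ|d|+1) strictly exceeds the number of rounds
-- the Python loop performs, so the fuel branch is never taken there.
def moveLoopA : Nat → List Int → Int → Int
  | 0, _, rounds => rounds
  | fuel+1, xs, rounds =>
    match PySem.List.min? xs (fun y => y), PySem.List.max? xs (fun y => y) with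
    | some mn, some mx =>
      match PySem.List.index? xs mn, PySem.List.index? xs mx with
      | some min_pos, some max_pos =>
        if xs.getD min_pos 0 = xs.getD max_pos 0 then rounds  -- all sorted: break
        else
          let xs1 := xs.set min_pos (xs.getD min_pos 0 + 1)    -- ducks[min_pos] += 1
          let xs2 := xs1.set max_pos (xs1.getD max_pos 0 - 1)  -- ducks[max_pos] -= 1
          moveLoopA fuel xs2 (rounds + 1)
      | _, _ => rounds  -- unreachable: min/max are members of xs
    | _, _ => rounds    -- min([]) / max([]) raise ValueError (excluded by Pre_)

def move_left_v2 (ducks : List Int) (max_rounds : Int) : Int :=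
  moveLoopA (2 * (ducks.map Int.natAbs).sum + 1) ducks 0

-- ===== PORT B =====
def move_left_v2_alt (ducks : List Int) (max_rounds : Int) : Int :=
  let mean := PySem.Int.floordiv ducks.sum (ducks.length : Int)
  ((ducks.filter (fun d => decide (mean < d))).map (fun d => d - mean)).sum

-- ===== PRECONDITION & SPEC =====
-- Pre_ excludes the empty list (min([]) raises ValueError in A) and lists whose sum
-- is not divisible by their length (A's while loop never terminates there).
def Pre_move_left_v2 (ducks : List Int) (max_rounds : Int) : Prop :=
  ducks ≠ [] ∧ (ducks.length : Int) ∣ ducks.sum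
instance (ducks : List Int) (max_rounds : Int) : Decidable (Pre_move_left_v2 ducks max_rounds) := by
  unfold Pre_move_left_v2; infer_instance

def pvWitness_move_left_v2 : List Int × Int := ([1, 3, 2], -1)

def Spec_move_left_v2 (ducks : List Int) (max_rounds : Int) (out : Int) : Prop := out = move_left_v2_alt ducks max_rounds
instance (ducks : List Int) (max_rounds : Int) (out : Int) : Decidable (Spec_move_left_v2 ducks max_rounds out) := by unfold Spec_move_left_v2; infer_instance

-- ===== CLAIM (what is proved, stated in full; the proofs are below) =====
def Claim_equal_move_left_v2 : Prop := ∀ (ducks : List Int) (max_rounds : Int), Dom_move_left_v2 ducks max_rounds → Pre_move_left_v2 ducks max_rounds → Spec_move_left_v2 ducks max_rounds (move_left_v2 ducks max_rounds)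

-- ===== LEMMAS AND PROOFS =====

-- total surplus above m
def excess (xs : List Int) (m : Int) : Int := (xs.map (fun d => max (d - m) 0)).sum

theorem excess_nonneg (xs : List Int) (m : Int) : 0 ≤ excess xs m := by
  apply List.sum_nonneg
  intro x hx
  obtain ⟨d, _, rfl⟩ := List.mem_map.mp hx
  exact le_max_right _ _

theorem sum_map_add_len (xs : List Int) (f : Int → Int) (c : Int) :
    (xs.map (fun d => f d + c)).sum = (xs.map f).sum + (xs.length : Int) * c := by
  induction xs with
  | nil => simp
  | cons a t ih => simp [ih]; ring

theorem sum_map_sub (xs : List Int) (m : Int) :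
    (xs.map (fun y => y - m)).sum = xs.sum - (xs.length : Int) * m := by
  induction xs with
  | nil => simp
  | cons a t ih => simp [ih]; ring

theorem sum_map_rsub (xs : List Int) (m : Int) :
    (xs.map (fun y => m - y)).sum = (xs.length : Int) * m - xs.sum := by
  induction xs with
  | nil => simp
  | cons a t ih => simp [ih]; ring

theorem excess_eq_filter (xs : List Int) (m : Int) :
    excess xs m = ((xs.filter (fun d => decide (m < d))).map (fun d => d - m)).sum := by
  induction xs with
  | nil => rfl
  | cons a t ih =>
    by_cases h : m < a
    · simp [excess, h, max_eq_left (by omega : (0 : Int) ≤ a - m)] at *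
      omega
    · simp [excess, h, max_eq_right (by omega : a - m ≤ (0 : Int))] at *
      exact ih

theorem sum_map_set (xs : List Int) (f : Int → Int) (i : Nat) (hi : i < xs.length) (v : Int) :
    ((xs.set i v).map f).sum = (xs.map f).sum + (f v - f xs[i]) := by
  induction xs generalizing i with
  | nil => simp at hi
  | cons a t ih =>
    cases i with
    | zero =>
      simp only [List.set_cons_zero, List.map_cons, List.sum_cons, List.getElem_cons_zero]
      omega
    | succ k =>
      have hk : k < t.length := by simpa using hi
      simp only [List.set_cons_succ, List.map_cons, List.sum_cons, List.getElem_cons_succ]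
      rw [ih k hk]
      omega

theorem sum_set_int (xs : List Int) (i : Nat) (hi : i < xs.length) (v : Int) :
    (xs.set i v).sum = xs.sum + (v - xs[i]) := by
  have h := sum_map_set xs (fun d => d) i hi v
  simpa using h

theorem abs_sum_le_int (xs : List Int) : |xs.sum| ≤ (xs.map (fun d => |d|)).sum := by
  induction xs with
  | nil => simp
  | cons a t ih =>
    simp only [List.sum_cons, List.map_cons]
    calc |a + t.sum| ≤ |a| + |t.sum| := abs_add_le _ _
    _ ≤ |a| + (t.map (fun d => |d|)).sum := by omega

theorem natAbs_sum_cast (xs : List Int) :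
    ((xs.map Int.natAbs).sum : Int) = (xs.map (fun d => |d|)).sum := by
  induction xs with
  | nil => simp
  | cons a t ih => simp [ih]

theorem excess_le (xs : List Int) (m : Int) :
    excess xs m ≤ (xs.map (fun d => |d|)).sum + (xs.length : Int) * |m| := by
  have h1 : (xs.map (fun d => max (d - m) 0)).sum ≤ (xs.map (fun d => |d| + |m|)).sum := by
    apply List.sum_le_sum
    intro d _
    have h2 : d ≤ |d| := le_abs_self d
    have h3 : -m ≤ |m| := neg_le_abs m
    have h4 : 0 ≤ |d| := abs_nonneg d
    have h5 : 0 ≤ |m| := abs_nonneg m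
    omega
  calc excess xs m ≤ (xs.map (fun d => |d| + |m|)).sum := h1
  _ = (xs.map (fun d => |d|)).sum + (xs.length : Int) * |m| := sum_map_add_len xs _ _

-- strict bounds: the min is below the mean and the max above it, unless all equal
theorem min_lt_mean (xs : List Int) (m mn mx : Int)
    (hsum : xs.sum = (xs.length : Int) * m)
    (hmn : mn ∈ xs) (hmin : ∀ y ∈ xs, mn ≤ y)
    (hmx : mx ∈ xs) (hmax : ∀ y ∈ xs, y ≤ mx)
    (hne : mn ≠ mx) : mn < m ∧ m < mx := by
  have hmnmx : mn < mx := lt_of_le_of_ne (hmin mx hmx) hne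
  constructor
  · by_contra h
    have hm : m ≤ mn := by omega
    have hterm : mx - m ∈ xs.map (fun y => y - m) := List.mem_map.mpr ⟨mx, hmx, rfl⟩
    have hall : ∀ x ∈ xs.map (fun y => y - m), 0 ≤ x := by
      intro x hx
      obtain ⟨y, hy, rfl⟩ := List.mem_map.mp hx
      have := hmin y hy; omega
    have hle := List.single_le_sum hall _ hterm
    have hzero := sum_map_sub xs m
    omega
  · by_contra h
    have hm : mx ≤ m := by omega
    have hterm : m - mn ∈ xs.map (fun y => m - y) := List.mem_map.mpr ⟨mn, hmn, rfl⟩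
    have hall : ∀ x ∈ xs.map (fun y => m - y), 0 ≤ x := by
      intro x hx
      obtain ⟨y, hy, rfl⟩ := List.mem_map.mp hx
      have := hmax y hy; omega
    have hle := List.single_le_sum hall _ hterm
    have hzero := sum_map_rsub xs m
    omega

theorem all_eq_excess_zero (xs : List Int) (m c : Int)
    (hsum : xs.sum = (xs.length : Int) * m) (hx : xs ≠ [])
    (hall : ∀ y ∈ xs, y = c) : excess xs m = 0 := by
  have hsum2 : xs.sum = (xs.length : Int) * c := by
    have hz : (xs.map (fun y => y - c)).sum = 0 := List.sum_eq_zero (by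
      intro x hx'
      obtain ⟨y, hy, rfl⟩ := List.mem_map.mp hx'
      have := hall y hy; omega)
    have h2 := sum_map_sub xs c
    omega
  have hlen : 0 < xs.length := List.length_pos_iff.mpr hx
  have hl : (0 : Int) < (xs.length : Int) := by exact_mod_cast hlen
  have hmc : m = c := mul_left_cancel₀ (by omega) (hsum.symm.trans hsum2)
  apply List.sum_eq_zero
  intro x hx'
  obtain ⟨y, hy, rfl⟩ := List.mem_map.mp hx'
  have := hall y hy
  omega

theorem loopA_eq (fuel : Nat) : ∀ (xs : List Int) (rounds m : Int),
    xs ≠ [] → xs.sum = (xs.length : Int) * m → excess xs m < (fuel : Int) →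
    moveLoopA fuel xs rounds = rounds + excess xs m := by
  induction fuel with
  | zero =>
    intro xs rounds m _ _ hfuel
    have := excess_nonneg xs m
    simp at hfuel
    omega
  | succ fuel ih =>
    intro xs rounds m hx hsum hfuel
    obtain ⟨mn, hmn⟩ : ∃ mn, PySem.List.min? xs (fun y => y) = some mn := by
      cases h : PySem.List.min? xs (fun y => y) with
      | none => exact absurd ((PySem.List.min?_eq_none_iff xs _).mp h) hx
      | some v => exact ⟨v, rfl⟩
    obtain ⟨mx, hmx⟩ : ∃ mx, PySem.List.max? xs (fun y => y) = some mx := by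
      cases h : PySem.List.max? xs (fun y => y) with
      | none => exact absurd ((PySem.List.max?_eq_none_iff xs _).mp h) hx
      | some v => exact ⟨v, rfl⟩
    have hmn_mem : mn ∈ xs := PySem.List.min?_mem hmn
    have hmx_mem : mx ∈ xs := PySem.List.max?_mem hmx
    have hmin : ∀ y ∈ xs, mn ≤ y := by
      have := PySem.List.min?_isMin hmn; simpa using this
    have hmax : ∀ y ∈ xs, y ≤ mx := by
      have := PySem.List.max?_isMax hmx; simpa using this
    obtain ⟨i, hi⟩ : ∃ i, PySem.List.index? xs mn = some i := by
      cases h : PySem.List.index? xs mn with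
      | none => exact absurd hmn_mem ((PySem.List.index?_eq_none_iff xs mn).mp h)
      | some v => exact ⟨v, rfl⟩
    obtain ⟨j, hj⟩ : ∃ j, PySem.List.index? xs mx = some j := by
      cases h : PySem.List.index? xs mx with
      | none => exact absurd hmx_mem ((PySem.List.index?_eq_none_iff xs mx).mp h)
      | some v => exact ⟨v, rfl⟩
    obtain ⟨hilt, hival, -⟩ := PySem.List.getElem_of_index?_eq_some hi
    obtain ⟨hjlt, hjval, -⟩ := PySem.List.getElem_of_index?_eq_some hj
    have hgi : xs.getD i 0 = mn := by rw [List.getD_eq_getElem xs 0 hilt, hival]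
    have hgj : xs.getD j 0 = mx := by rw [List.getD_eq_getElem xs 0 hjlt, hjval]
    simp only [moveLoopA, hmn, hmx, hi, hj]
    by_cases heq : mn = mx
    · rw [if_pos (by rw [hgi, hgj, heq])]
      have hz : excess xs m = 0 := by
        apply all_eq_excess_zero xs m mn hsum hx
        intro y hy
        have h1 := hmin y hy
        have h2 := hmax y hy
        omega
      omega
    · rw [if_neg (by rw [hgi, hgj]; exact heq)]
      have hij : i ≠ j := by
        intro h; apply heq; rw [← hival, ← hjval]; congr 1
      have hbounds := min_lt_mean xs m mn mx hsum hmn_mem hmin hmx_mem hmax heq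
      rw [hgi]
      have hjlt1 : j < (xs.set i (mn + 1)).length := by simpa using hjlt
      have hset1j : (xs.set i (mn + 1))[j]'hjlt1 = mx := by
        rw [List.getElem_set_ne hij]; exact hjval
      have hgj1 : (xs.set i (mn + 1)).getD j 0 = mx := by
        rw [List.getD_eq_getElem _ 0 hjlt1, hset1j]
      rw [hgj1]
      have hlen2 : ((xs.set i (mn + 1)).set j (mx - 1)).length = xs.length := by simp
      have hne2 : (xs.set i (mn + 1)).set j (mx - 1) ≠ [] := by
        apply List.ne_nil_of_length_pos
        have : 0 < xs.length := List.length_pos_iff.mpr hx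
        omega
      have hsum1 : (xs.set i (mn + 1)).sum = xs.sum + 1 := by
        rw [sum_set_int xs i hilt, hival]; ring
      have hsum2 : ((xs.set i (mn + 1)).set j (mx - 1)).sum = xs.sum := by
        rw [sum_set_int _ j hjlt1, hset1j, hsum1]; ring
      have hsum2' : ((xs.set i (mn + 1)).set j (mx - 1)).sum
          = ((((xs.set i (mn + 1)).set j (mx - 1)).length : Nat) : Int) * m := by
        rw [hsum2, hlen2, hsum]
      have e1 : excess (xs.set i (mn + 1)) m = excess xs m := by
        unfold excess
        rw [sum_map_set xs _ i hilt, hival]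
        have hb1 := hbounds.1
        omega
      have e2 : excess ((xs.set i (mn + 1)).set j (mx - 1)) m
          = excess (xs.set i (mn + 1)) m - 1 := by
        unfold excess
        rw [sum_map_set _ _ j hjlt1, hset1j]
        have hb2 := hbounds.2
        omega
      have hfuel2 : excess ((xs.set i (mn + 1)).set j (mx - 1)) m < (fuel : Int) := by
        push_cast at hfuel
        omega
      rw [ih _ (rounds + 1) m hne2 hsum2' hfuel2]
      omega

theorem alt_eq_excess (ducks : List Int) (max_rounds m : Int)
    (hx : ducks ≠ []) (hsum : ducks.sum = (ducks.length : Int) * m) :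
    move_left_v2_alt ducks max_rounds = excess ducks m := by
  have hlen : 0 < ducks.length := List.length_pos_iff.mpr hx
  have hlpos : (0 : Int) < (ducks.length : Int) := by exact_mod_cast hlen
  have hmean : PySem.Int.floordiv ducks.sum (ducks.length : Int) = m := by
    rw [PySem.Int.floordiv_eq_ediv_of_pos hlpos, hsum,
      Int.mul_ediv_cancel_left m (by omega)]
  unfold move_left_v2_alt
  rw [hmean, ← excess_eq_filter]

-- ===== VERDICT (by name: the statement is the Claim_ definition above) =====
theorem move_left_v2_spec : Claim_equal_move_left_v2 := by
  intro ducks max_rounds _ hpre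
  obtain ⟨hx, q, hq⟩ := hpre
  have hsum : ducks.sum = (ducks.length : Int) * q := hq
  unfold Spec_move_left_v2 move_left_v2
  rw [alt_eq_excess ducks max_rounds q hx hsum]
  -- fuel bound: excess ≤ Σ|d| + |sum| ≤ 2Σ|d| < 2Σ|d| + 1
  have hb : excess ducks q < ((2 * (ducks.map Int.natAbs).sum + 1 : Nat) : Int) := by
    have h1 := excess_le ducks q
    have h2 : (ducks.length : Int) * |q| = |ducks.sum| := by
      rw [hsum, abs_mul, abs_of_nonneg (by positivity : (0 : Int) ≤ (ducks.length : Int))]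
    have h3 := abs_sum_le_int ducks
    have h4 := natAbs_sum_cast ducks
    have h5 : ((2 * (ducks.map Int.natAbs).sum + 1 : Nat) : Int)
        = 2 * (((ducks.map Int.natAbs).sum : Nat) : Int) + 1 := by push_cast; ring
    omega
  rw [loopA_eq _ ducks 0 q hx hsum hb]
  omega
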